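-- pv_equiv track=rewrite | github.com/MarioGuerra21008/LabAB-LexicalAnalyzer | lexicalAnalyzer.py | question_mark
-- ===== SOURCE A (Python) =====
-- def question_mark(expression):
--     i = 0
--     new_expression = ''
--     while i < len(expression):
--         if expression[i] == '?' and i + 1 < len(expression) and expression[i + 1] == '|':
--             new_expression += '|ε'
--             i += 2
--         elif expression[i] == '?' and i + 1 < len(expression) and expression[i + 1].isalnum() == True:
--             new_expression += '|ε'
--             i += 1
--         elif expression[i] == '?':
--             new_expression += '|ε'
--             i += 1
--         else:
--             new_expression += expression[i]
--             i += 1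
--     return new_expression
-- ===== SOURCE B (Python) =====
-- def question_mark(expression):
--     parts = expression.split('?')
--     return parts[0] + ''.join('|ε' + (p[1:] if p.startswith('|') else p) for p in parts[1:])
-- ===== Notes on version B (the rewrite author's own statement) =====
-- stated objective: faster
-- what changed: Replaces the index-driven while loop that grows the result by repeated string += (quadratic in CPython) with one split on '?' and a single join with '|ε', dropping a leading '|' from each piece after a '?' (which reproduces the '?|' double-skip).
import Mathlib
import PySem

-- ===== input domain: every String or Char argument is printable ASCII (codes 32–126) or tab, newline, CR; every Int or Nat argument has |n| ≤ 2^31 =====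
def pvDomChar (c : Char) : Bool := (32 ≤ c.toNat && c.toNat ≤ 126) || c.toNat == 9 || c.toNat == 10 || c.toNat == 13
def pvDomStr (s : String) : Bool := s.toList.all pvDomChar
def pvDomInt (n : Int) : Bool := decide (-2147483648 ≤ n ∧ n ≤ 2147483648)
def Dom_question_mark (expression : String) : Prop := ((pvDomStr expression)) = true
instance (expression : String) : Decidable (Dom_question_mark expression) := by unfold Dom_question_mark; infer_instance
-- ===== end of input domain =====

-- B rewrites A's character-by-character while loop as a single split on '?' joined with '|ε' (simpler); return values proved equal.

-- ===== PORT A =====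
-- A's while loop over indices, as the obvious structural recursion over the character list;
-- the branches appear in A's order ('?' followed by '|' skips the '|'; the isalnum branch and
-- the bare-'?' branch both emit "|ε" and advance by one, exactly as in A).
def qmACore : List Char → List Char
  | [] => []
  | '?' :: '|' :: rest => '|' :: 'ε' :: qmACore rest
  | '?' :: rest =>
      if (match rest with | d :: _ => PySem.Chars.isalnum d | [] => false) then
        '|' :: 'ε' :: qmACore rest
      else
        '|' :: 'ε' :: qmACore rest
  | c :: rest => c :: qmACore rest

def question_mark (expression : String) : String :=
  String.mk (qmACore expression.toList)

-- ===== PORT B =====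
-- p[1:] if p.startswith('|') else p
def qmStrip (p : List Char) : List Char :=
  if PySem.Chars.startswith p ['|'] then p.drop 1 else p

def question_mark_alt (expression : String) : String :=
  let parts := expression.toList.splitOn '?'
  String.mk (parts.headI ++ parts.tail.flatMap (fun p => '|' :: 'ε' :: qmStrip p))

-- ===== PRECONDITION & SPEC =====
def Spec_question_mark (expression : String) (out : String) : Prop := out = question_mark_alt expression
instance (expression : String) (out : String) : Decidable (Spec_question_mark expression out) := by unfold Spec_question_mark; infer_instance

-- ===== CLAIM (what is proved, stated in full; the proofs are below) =====
def Claim_equal_question_mark : Prop := ∀ (expression : String), Dom_question_mark expression → Spec_question_mark expression (question_mark expression)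

-- ===== LEMMAS AND PROOFS =====

-- body of B on the list side
def qmBCore (l : List Char) : List Char :=
  (l.splitOn '?').headI ++ (l.splitOn '?').tail.flatMap (fun p => '|' :: 'ε' :: qmStrip p)

theorem splitOn_q (l : List Char) : l.splitOn '?' = l.splitOnP (· == '?') := rfl

theorem qmStrip_bar (h : List Char) : qmStrip ('|' :: h) = h := by
  simp [qmStrip, PySem.Chars.startswith]

theorem qmStrip_of_ne {d : Char} (h : List Char) (hd : d ≠ '|') : qmStrip (d :: h) = d :: h := by
  have : PySem.Chars.startswith (d :: h) ['|'] = false := by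
    rw [← Bool.not_eq_true, PySem.Chars.startswith_iff]
    intro hpre
    rcases hpre with ⟨t, ht⟩
    simp at ht
    exact hd ht.1.symm
  simp [qmStrip, this]

theorem qmStrip_nil : qmStrip [] = [] := by simp [qmStrip, PySem.Chars.startswith]

theorem qmBCore_head_not_bar (l : List Char) (hl : ∀ d t, l = d :: t → d ≠ '|') :
    qmStrip ((l.splitOnP (· == '?')).headI) = (l.splitOnP (· == '?')).headI := by
  cases l with
  | nil => simp [List.splitOnP_nil, qmStrip_nil]
  | cons d t =>
    by_cases hq : d = '?'
    · simp [List.splitOnP_cons, hq, qmStrip_nil]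
    · have hd : d ≠ '|' := hl d t rfl
      rw [List.splitOnP_cons]
      simp only [hq, beq_iff_eq]
      cases ht : t.splitOnP (· == '?') with
      | nil => exact absurd ht (List.splitOnP_ne_nil _ t)
      | cons h0 hs => simp [qmStrip_of_ne _ hd]

-- the '?' step of A when the next character is not '|': both isalnum sub-branches of A emit "|\u03b5"
theorem qm_step_q (rest : List Char) (hnb : ∀ (t : List Char), rest = '|' :: t → False)
    (ih : qmACore rest = qmBCore rest) : qmACore ('?' :: rest) = qmBCore ('?' :: rest) := by
  have hA : qmACore ('?' :: rest) = '|' :: '\u03b5' :: qmACore rest := by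
    cases rest with
    | nil => rfl
    | cons d t => rw [qmACore.eq_3 d t hnb, ite_self]
  cases ht : rest.splitOnP (· == '?') with
  | nil => exact absurd ht (List.splitOnP_ne_nil _ rest)
  | cons h0 hs =>
    have hnb' : ∀ (d : Char) (t : List Char), rest = d :: t → d ≠ '|' := by
      intro d t hdt hb
      exact hnb t (by rw [hdt, hb])
    have hstrip := qmBCore_head_not_bar rest hnb'
    rw [ht] at hstrip
    simp only [List.headI] at hstrip
    rw [hA, ih]
    simp only [qmBCore, splitOn_q, List.splitOnP_cons, ht]
    simp [hstrip]

theorem qmCore_eq (l : List Char) : qmACore l = qmBCore l := by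
  induction l using qmACore.induct with
  | case1 => simp [qmACore, qmBCore]
  | case2 rest ih =>
    -- '?' :: '|' :: rest
    cases ht : rest.splitOnP (· == '?') with
    | nil => exact absurd ht (List.splitOnP_ne_nil _ rest)
    | cons h0 hs =>
      simp only [qmACore.eq_2, ih, qmBCore, splitOn_q, List.splitOnP_cons, ht]
      simp [qmStrip_bar]
  | case3 rest hnb _ ih => exact qm_step_q rest hnb ih
  | case4 rest hnb _ ih => exact qm_step_q rest hnb ih
  | case5 c rest _ hq ih =>
    -- c :: rest, c ≠ '?'
    have hc : (c == '?') = false := by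
      simp only [beq_eq_false_iff_ne, ne_eq]
      exact hq
    cases ht : rest.splitOnP (· == '?') with
    | nil => exact absurd ht (List.splitOnP_ne_nil _ rest)
    | cons h0 hs =>
      have he : qmACore (c :: rest) = c :: qmACore rest :=
        qmACore.eq_5 c rest (fun _ h _ => hq h) hq
      rw [he, ih]
      simp only [qmBCore, splitOn_q, List.splitOnP_cons, hc, ht]
      simp

-- ===== VERDICT (by name: the statement is the Claim_ definition above) =====
theorem question_mark_spec : Claim_equal_question_mark := by
  intro e _
  unfold Spec_question_mark question_mark question_mark_alt
  rw [qmCore_eq]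
  rfl
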